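-- pv_equiv track=rewrite | github.com/KrashKart/python-problems | indiv_solutions/044-oware_move.py | oware_move
-- ===== SOURCE A (Python) =====
-- def oware_move(board, house):
--     n = len(board)
--     i, offset = 1, 0
--     while i < board[house] + 1 + offset:
--         if (house + i) % n != house:
--             board[(house + i) % n] += 1
--         else:
--             offset += 1
--         i += 1
--
--     i -= 1
--     board[house] = 0
--     while True:
--         if 1 < board[(house + i) % n] < 4 and (house + i) % n >= n // 2:
--             board[(house + i) % n] = 0
--             i -= 1
--         else:
--             break
--     return board
-- ===== SOURCE B (Python) =====
-- def oware_move(board, house):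
--     n = len(board)
--     s = board[house]          # seeds in the chosen house (IndexError for bad house, as in A)
--     h = house % n             # normalised house index
--     if s <= 0 or n == 1:
--         board[h] = 0
--         return board
--     q, r = divmod(s, n - 1)   # every other house gets q seeds, the first r houses one extra
--     out = [0 if k == h else v + q + (1 if (k - h) % n <= r else 0)
--            for k, v in enumerate(board)]
--     idx = (h + 1 + (s - 1) % (n - 1)) % n   # last sown house
--     while 1 < out[idx] < 4 and idx >= n // 2:
--         out[idx] = 0
--         idx = (idx - 1) % n
--     return out
-- ===== Notes on version B (the rewrite author's own statement) =====
-- stated objective: alternative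
-- what changed: A sows the seeds one by one in a while loop (one iteration per seed, plus skip iterations over the moving house); B computes each house's gain in closed form with divmod over the n-1 receiving houses and the last sown index arithmetically, building the result board in a single comprehension before the capture walk.
import Mathlib
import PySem

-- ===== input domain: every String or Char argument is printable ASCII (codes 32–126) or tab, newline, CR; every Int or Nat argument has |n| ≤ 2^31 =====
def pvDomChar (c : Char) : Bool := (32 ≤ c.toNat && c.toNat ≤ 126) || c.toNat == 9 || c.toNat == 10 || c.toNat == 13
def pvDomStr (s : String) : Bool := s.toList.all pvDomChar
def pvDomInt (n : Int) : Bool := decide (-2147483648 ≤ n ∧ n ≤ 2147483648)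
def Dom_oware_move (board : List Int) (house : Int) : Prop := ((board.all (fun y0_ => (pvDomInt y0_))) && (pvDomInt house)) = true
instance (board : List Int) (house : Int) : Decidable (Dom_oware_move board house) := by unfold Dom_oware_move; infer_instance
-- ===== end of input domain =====

-- B replaces A's per-seed sowing while-loop by a closed-form div/mod distribution over the n-1
-- receiving houses; A mutates `board` in place while B builds a new list in the sowing path:
-- the equivalence proved here is about the RETURN value only.

-- ===== PORT A =====
-- board[k] += 1 for a known-in-range Nat index (Python in-place update; exact since the index
-- fed in is a Python `%` result, hence in [0, n)).
def pvBump (xs : List Int) (k : Nat) : List Int := xs.set k (xs.getD k 0 + 1)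

-- A's first while loop: state (board, i, offset); re-reads board[house] each iteration like the
-- Python condition does.  Fuel only makes the recursion total: it is chosen large enough
-- (2*seeds+2) for every input Pre_ admits; on none (= IndexError) the current state is returned
-- (Pre_ excludes those inputs).
def pvSowA (house n : Int) : Nat → List Int → Int → Int → List Int × Int
  | 0, board, i, _ => (board, i)
  | fuel+1, board, i, offset =>
    match PySem.List.pyGet? board house with
    | none => (board, i)
    | some s =>
      if i < s + 1 + offset then
        if PySem.Int.mod (house + i) n ≠ house then
          pvSowA house n fuel (pvBump board (PySem.Int.mod (house + i) n).toNat) (i+1) offset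
        else
          pvSowA house n fuel board (i+1) (offset+1)
      else (board, i)

-- A's second while loop (captures); at most n iterations can take the zeroing branch, so fuel
-- n+1 is exact on every input Pre_ admits.
def pvCapA (house n : Int) : Nat → List Int → Int → List Int
  | 0, board, _ => board
  | fuel+1, board, i =>
    if 1 < board.getD ((PySem.Int.mod (house + i) n).toNat) 0 ∧
       board.getD ((PySem.Int.mod (house + i) n).toNat) 0 < 4 ∧
       PySem.Int.mod (house + i) n ≥ PySem.Int.floordiv n 2 then
      pvCapA house n fuel (board.set ((PySem.Int.mod (house + i) n).toNat) 0) (i - 1)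
    else board

-- Python `board[house] = 0` for an in-range (possibly negative) index.
def pvHouseIdx (house : Int) (len : Nat) : Nat := (if house < 0 then house + (len:Int) else house).toNat

def oware_move (board : List Int) (house : Int) : List Int :=
  let n : Int := board.length
  match PySem.List.pyGet? board house with
  | none => board   -- board[house] raises IndexError: outside Pre_
  | some s =>
      let p := pvSowA house n ((2*s).toNat + 2) board 1 0
      pvCapA house n (board.length + 1) ((p.1).set (pvHouseIdx house board.length) 0) (p.2 - 1)

-- ===== PORT B =====
-- B's capture while loop (same fuel remark as for pvCapA).
def pvCapB (n : Int) : Nat → List Int → Nat → List Int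
  | 0, out, _ => out
  | fuel+1, out, idx =>
    if 1 < out.getD idx 0 ∧ out.getD idx 0 < 4 ∧ (idx:Int) ≥ PySem.Int.floordiv n 2 then
      pvCapB n fuel (out.set idx 0) ((PySem.Int.mod ((idx:Int) - 1) n).toNat)
    else out

def oware_move_alt (board : List Int) (house : Int) : List Int :=
  let n : Int := board.length
  match PySem.List.pyGet? board house with
  | none => board   -- board[house] raises IndexError: outside Pre_
  | some s =>
    let h : Nat := (PySem.Int.mod house n).toNat
    if s ≤ 0 ∨ n = 1 then board.set h 0
    else
      let q := PySem.Int.floordiv s (n - 1)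
      let r := PySem.Int.mod s (n - 1)
      -- Source B's list comprehension over enumerate(board)
      let out := (PySem.List.enumerate board).map (fun kv =>
        if kv.1 = (h:Int) then 0
        else kv.2 + q + (if PySem.Int.mod (kv.1 - (h:Int)) n ≤ r then 1 else 0))
      pvCapB n (board.length + 1) out ((PySem.Int.mod ((h:Int) + 1 + PySem.Int.mod (s - 1) (n - 1)) n).toNat)

-- ===== PRECONDITION & SPEC =====
-- Pre_ excludes only inputs where A does not return: the empty board and out-of-range house
-- (board[house] raises IndexError), and a 1-house board with seeds > 0 (A's sowing loop never
-- terminates there, since every step is a skip that also extends the bound).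
def Pre_oware_move (board : List Int) (house : Int) : Prop :=
  board ≠ [] ∧ -(board.length : Int) ≤ house ∧ house < (board.length : Int) ∧
    (board.length = 1 → board.getD 0 0 ≤ 0)
instance (board : List Int) (house : Int) : Decidable (Pre_oware_move board house) := by
  unfold Pre_oware_move; infer_instance

def pvWitness_oware_move : List Int × Int := ([4, 1, 2, 0], 1)

def Spec_oware_move (board : List Int) (house : Int) (out : List Int) : Prop := out = oware_move_alt board house
instance (board : List Int) (house : Int) (out : List Int) : Decidable (Spec_oware_move board house out) := by unfold Spec_oware_move; infer_instance

-- ===== CLAIM (what is proved, stated in full; the proofs are below) =====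
def Claim_equal_oware_move : Prop := ∀ (board : List Int) (house : Int), Dom_oware_move board house → Pre_oware_move board house → Spec_oware_move board house (oware_move board house)

-- ===== LEMMAS AND PROOFS =====


-- Number of seeds index j receives when r seeds are sown starting at relative position d
-- (positions 1..n-1 measured from the house h, wrapping back to 1 after n-1).
def pvSowCnt (n h : Nat) : Nat → Nat → Nat → Nat
  | 0, _, _ => 0
  | r+1, d, j => (if j = (h + d) % n then 1 else 0) + pvSowCnt n h r (if d = n - 1 then 1 else d + 1) j

def pvPos (n : Nat) (i : Int) : Nat := if (i % (n:Int)).toNat = 0 then 1 else (i % (n:Int)).toNat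

theorem pv_getD_set (xs : List Int) (k j : Nat) (v : Int) (hk : k < xs.length) :
    (xs.set k v).getD j 0 = if j = k then v else xs.getD j 0 := by
  simp only [List.getD_eq_getElem?_getD, List.getElem?_set]
  by_cases hj : j = k
  · subst hj; simp [hk]
  · rw [if_neg (fun h => hj h.symm), if_neg hj]

theorem pv_pyGet_house (xs : List Int) (house : Int)
    (h1 : -(xs.length:Int) ≤ house) (h2 : house < xs.length) :
    PySem.List.pyGet? xs house = some (xs.getD (pvHouseIdx house xs.length) 0) := by
  by_cases h0 : 0 ≤ house
  · rw [PySem.List.pyGet?_of_nonneg _ h0]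
    have hlt : house.toNat < xs.length := by omega
    have hH : pvHouseIdx house xs.length = house.toNat := by simp [pvHouseIdx]; omega
    rw [hH]
    simp [List.getD_eq_getElem?_getD, List.getElem?_eq_getElem hlt]
  · have main := PySem.List.pyGet?_neg_natCast xs (-house).toNat (by omega) (by omega)
    rw [show (-(((-house).toNat : Nat) : Int)) = house by omega] at main
    have hlt : xs.length - (-house).toNat < xs.length := by omega
    have hH : pvHouseIdx house xs.length = xs.length - (-house).toNat := by
      simp [pvHouseIdx]; omega
    rw [main, hH]
    simp [List.getD_eq_getElem?_getD, List.getElem?_eq_getElem hlt]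

theorem pv_emod_house (house : Int) (n : Nat) (h1 : -(n:Int) ≤ house) (h2 : house < n) :
    house % (n:Int) = ((pvHouseIdx house n : Nat) : Int) := by
  by_cases h0 : 0 ≤ house
  · rw [Int.emod_eq_of_lt h0 h2]; simp [pvHouseIdx]; omega
  · rw [(Int.add_emod_right house n).symm, Int.emod_eq_of_lt (by omega) (by omega)]
    simp [pvHouseIdx]; omega

theorem pv_addmod_inj (n h d e : Nat) (hd : d < n) (he : e < n) :
    ((h + d) % n = (h + e) % n) ↔ d = e := by
  constructor
  · intro hq
    have := Nat.ModEq.add_left_cancel' h (hq : (h+d) ≡ (h+e) [MOD n]).symm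
    simpa [Nat.ModEq, Nat.mod_eq_of_lt hd, Nat.mod_eq_of_lt he] using this.symm
  · rintro rfl; rfl

theorem pv_addmod_ne (n h d : Nat) (hh : h < n) (hd1 : 1 ≤ d) (hd2 : d < n) : (h + d) % n ≠ h := by
  intro he
  have h0 : (h + d) % n = (h + 0) % n := by simpa [Nat.mod_eq_of_lt hh] using he
  have := (pv_addmod_inj n h d 0 hd2 (by omega)).mp h0
  omega

theorem pv_shift (house : Int) (n : Nat) (hn : 0 < n)
    (hh1 : -(n:Int) ≤ house) (hh2 : house < (n:Int)) (i : Int) :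
    (house + i) % (n:Int) = (((pvHouseIdx house n + (i % (n:Int)).toNat) % n : Nat) : Int) := by
  have hm0 : 0 ≤ i % (n:Int) := Int.emod_nonneg i (by omega)
  have : (house + i) % (n:Int) = (house % n + i % n) % (n:Int) := Int.add_emod house i n
  rw [this, pv_emod_house house n hh1 hh2,
    show ((pvHouseIdx house n : Nat) : Int) + i % n
       = (((pvHouseIdx house n + (i % (n:Int)).toNat : Nat)) : Int) by push_cast; omega]
  exact (Int.natCast_emod _ _).symm

theorem pv_sow_spec (n h : Nat) (house : Int) (hn : 2 ≤ n)
    (hh1 : -(n:Int) ≤ house) (hh2 : house < (n:Int)) (hH : h = pvHouseIdx house n) :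
    ∀ (fuel r : Nat) (i offset : Int) (board : List Int),
      board.length = n → 1 ≤ i →
      board.getD h 0 + 1 + offset - i = (r:Int) →
      2*r + (if i % (n:Int) = 0 then 1 else 0) + 1 ≤ fuel →
      (pvSowA house (n:Int) fuel board i offset).1.length = n ∧
      (∀ j : Nat, j < n → j ≠ h →
        (pvSowA house (n:Int) fuel board i offset).1.getD j 0
          = board.getD j 0 + (pvSowCnt n h r (pvPos n i) j : Int)) ∧
      (r = 0 → (pvSowA house (n:Int) fuel board i offset).2 = i) ∧
      (1 ≤ r → (house + ((pvSowA house (n:Int) fuel board i offset).2 - 1)) % (n:Int)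
          = (((h + 1 + ((pvPos n i - 1 + (r - 1)) % (n-1))) % n : Nat) : Int)) := by
  have hhlt : h < n := by
    simp [pvHouseIdx, hH]; omega
  intro fuel
  induction fuel with
  | zero =>
    intro r i offset board hlen hi hinv hfuel
    exfalso; split_ifs at hfuel <;> omega
  | succ f IH =>
    intro r i offset board hlen hi hinv hfuel
    have hb : PySem.List.pyGet? board house = some (board.getD h 0) := by
      have := pv_pyGet_house board house (by omega) (by omega)
      rwa [hlen, ← hH] at this
    have hnpos : (0:Int) < (n:Int) := by omega
    have hmod : PySem.Int.mod (house + i) (n:Int) = (house + i) % (n:Int) :=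
      PySem.Int.mod_eq_emod_of_pos hnpos
    have hshift : (house + i) % (n:Int) = (((h + (i % (n:Int)).toNat) % n : Nat) : Int) := by
      rw [hH]; exact pv_shift house n (by omega) hh1 hh2 i
    have hm0 : 0 ≤ i % (n:Int) := Int.emod_nonneg i (by omega)
    have hmlt : i % (n:Int) < (n:Int) := Int.emod_lt_of_pos i hnpos
    by_cases hc : i < board.getD h 0 + 1 + offset
    · obtain ⟨r', rfl⟩ : ∃ r', r = r' + 1 := ⟨r - 1, by omega⟩
      by_cases hsk : i % (n:Int) = 0
      · -- Python skip (house ≥ 0) or self-feeding bump (house < 0)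
        have hidx : (house + i) % (n:Int) = ((h : Nat) : Int) := by
          rw [hshift, hsk]
          simp only [Int.toNat_zero, add_zero, Nat.mod_eq_of_lt hhlt]
        have hpos1 : pvPos n i = 1 := by simp [pvPos, hsk]
        have hi1 : (i + 1) % (n:Int) = 1 := by
          rw [Int.add_emod, hsk]
          norm_num [Int.emod_eq_of_lt (by omega : (0:Int) ≤ 1) (by omega : (1:Int) < (n:Int))]
        have hpos1' : pvPos n (i+1) = 1 := by simp [pvPos, hi1]
        by_cases hneg : house < 0
        · -- self-feeding bump at index h
          have hcond : PySem.Int.mod (house + i) (n:Int) ≠ house := by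
            rw [hmod, hidx]; omega
          have step : pvSowA house (n:Int) (f+1) board i offset
              = pvSowA house (n:Int) f (pvBump board h) (i+1) offset := by
            simp only [pvSowA, hb, if_pos hc, hmod, hidx, Int.toNat_natCast]
            rw [if_pos (show ((h:Nat):Int) ≠ house from by omega)]
          have hbl : (pvBump board h).length = n := by simp [pvBump, hlen]
          have hbh : (pvBump board h).getD h 0 = board.getD h 0 + 1 := by
            unfold pvBump
            rw [pv_getD_set board h h _ (by omega)]
            simp
          have hinv' : (pvBump board h).getD h 0 + 1 + offset - (i+1) = ((r'+1 : Nat) : Int) := by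
            rw [hbh]; push_cast at hinv ⊢; omega
          have hfu' : 2*(r'+1) + (if (i+1) % (n:Int) = 0 then 1 else 0) + 1 ≤ f := by
            rw [hi1, if_pos hsk] at *
            norm_num
            omega
          obtain ⟨c1, c2, c3, c4⟩ := IH (r'+1) (i+1) offset (pvBump board h) hbl (by omega) hinv' hfu'
          rw [step]
          refine ⟨c1, fun j hj hjh => ?_, fun h0 => by omega, fun _ => ?_⟩
          · rw [c2 j hj hjh, hpos1', hpos1]
            have hun : (pvBump board h).getD j 0 = board.getD j 0 := by
              unfold pvBump
              rw [pv_getD_set board h j _ (by omega), if_neg hjh]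
            rw [hun]
          · rw [c4 (by omega), hpos1', hpos1]
        · -- Python skip branch
          have hcast : ((h:Nat):Int) = house := by
            rw [hH]; simp [pvHouseIdx, if_neg hneg]; omega
          have step : pvSowA house (n:Int) (f+1) board i offset
              = pvSowA house (n:Int) f board (i+1) (offset+1) := by
            simp only [pvSowA, hb, if_pos hc, hmod, hidx, Int.toNat_natCast]
            rw [if_neg (show ¬ (((h:Nat):Int) ≠ house) from by rw [hcast]; simp)]
          have hinv' : board.getD h 0 + 1 + (offset+1) - (i+1) = ((r'+1 : Nat) : Int) := by
            push_cast at hinv ⊢; omega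
          have hfu' : 2*(r'+1) + (if (i+1) % (n:Int) = 0 then 1 else 0) + 1 ≤ f := by
            rw [hi1, if_pos hsk] at *
            norm_num
            omega
          obtain ⟨c1, c2, c3, c4⟩ := IH (r'+1) (i+1) (offset+1) board hlen (by omega) hinv' hfu'
          rw [step]
          refine ⟨c1, fun j hj hjh => ?_, fun h0 => by omega, fun _ => ?_⟩
          · rw [c2 j hj hjh, hpos1', hpos1]
          · rw [c4 (by omega), hpos1', hpos1]
      · -- seed
        set m := (i % (n:Int)).toNat with hm
        have hm1 : 1 ≤ m := by omega
        have hmn : m < n := by omega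
        have hposm : pvPos n i = m := by
          unfold pvPos; rw [← hm, if_neg (by omega)]
        have hidx : (house + i) % (n:Int) = (((h + m) % n : Nat) : Int) := hshift
        have hkn : (h + m) % n < n := Nat.mod_lt _ (by omega)
        have hkh : (h + m) % n ≠ h := pv_addmod_ne n h m hhlt hm1 hmn
        have hcondc : ((((h+m) % n : Nat)):Int) ≠ house := by
          by_cases hneg : house < 0
          · omega
          · have hcast : ((h:Nat):Int) = house := by
              rw [hH]; simp [pvHouseIdx, if_neg hneg]; omega
            rw [← hcast]
            intro hq
            exact hkh (by exact_mod_cast hq)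
        have step : pvSowA house (n:Int) (f+1) board i offset
            = pvSowA house (n:Int) f (pvBump board ((h+m) % n)) (i+1) offset := by
          simp only [pvSowA, hb, if_pos hc, hmod, hidx, Int.toNat_natCast]
          rw [if_pos hcondc]
        have hbl : (pvBump board ((h+m) % n)).length = n := by simp [pvBump, hlen]
        have hbh : (pvBump board ((h+m) % n)).getD h 0 = board.getD h 0 := by
          unfold pvBump
          rw [pv_getD_set board _ h _ (by omega), if_neg (Ne.symm hkh)]
        have hpos' : pvPos n (i+1) = if m = n - 1 then 1 else m + 1 := by
          have hstep : (i + 1) % (n:Int) = (((m+1) % n : Nat) : Int) := by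
            rw [Int.add_emod, show i % (n:Int) = ((m:Nat):Int) by omega,
              Int.emod_eq_of_lt (by omega) (by omega : (1:Int) < (n:Int))]
            rw [show ((m:Nat):Int) + 1 = (((m+1:Nat)):Int) by push_cast; ring]
            exact (Int.natCast_emod _ _).symm
          by_cases hlast : m = n - 1
          · have hz : (m + 1) % n = 0 := by
              rw [show m + 1 = n by omega]; exact Nat.mod_self n
            unfold pvPos
            rw [hstep, Int.toNat_natCast, hz, if_pos rfl, if_pos hlast]
          · have hz : (m + 1) % n = m + 1 := Nat.mod_eq_of_lt (by omega)
            unfold pvPos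
            rw [hstep, Int.toNat_natCast, hz, if_neg (by omega), if_neg hlast]
        have hinv' : (pvBump board ((h+m) % n)).getD h 0 + 1 + offset - (i+1) = ((r' : Nat) : Int) := by
          rw [hbh]; push_cast at hinv ⊢; omega
        have hfu' : 2*r' + (if (i+1) % (n:Int) = 0 then 1 else 0) + 1 ≤ f := by
          split_ifs at hfuel ⊢ <;> omega
        obtain ⟨c1, c2, c3, c4⟩ := IH r' (i+1) offset (pvBump board ((h+m) % n)) hbl (by omega) hinv' hfu'
        rw [step]
        refine ⟨c1, fun j hj hjh => ?_, fun h0 => by omega, fun _ => ?_⟩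
        · rw [c2 j hj hjh]
          have hlocal : (pvBump board ((h+m) % n)).getD j 0
              = board.getD j 0 + (if j = (h + m) % n then 1 else 0) := by
            unfold pvBump
            rw [pv_getD_set board _ j _ (by omega)]
            by_cases hjk : j = (h+m) % n
            · rw [if_pos hjk, if_pos hjk, hjk]
            · rw [if_neg hjk, if_neg hjk]
              simp
          rw [hlocal, hposm]
          have hcnt : pvSowCnt n h (r'+1) m j
              = (if j = (h + m) % n then 1 else 0) + pvSowCnt n h r' (if m = n-1 then 1 else m+1) j := rfl
          rw [hcnt, ← hpos']
          push_cast
          ring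
        · -- final position
          rcases Nat.eq_zero_or_pos r' with hr0 | hr1
          · subst hr0
            rw [c3 rfl, show house + (i + 1 - 1) = house + i by ring, hidx, hposm]
            norm_cast
            rw [show (m - 1 + (0 + 1 - 1)) = m - 1 by omega,
              Nat.mod_eq_of_lt (show m - 1 < n - 1 by omega)]
            congr 1
            omega
          · have hx : (pvPos n (i+1) - 1 + (r' - 1)) % (n-1)
                = (m - 1 + (r' + 1 - 1)) % (n-1) := by
              by_cases hlast : m = n - 1
              · rw [hpos', if_pos hlast, show (1 - 1 + (r' - 1)) = r' - 1 by omega,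
                  show (m - 1 + (r' + 1 - 1)) = (r' - 1) + (n - 1) by omega, Nat.add_mod_right]
              · rw [hpos', if_neg hlast]
                congr 1
                omega
            rw [c4 hr1, hposm, hx]
    · -- loop exit
      have hr0 : r = 0 := by omega
      subst hr0
      have step : pvSowA house (n:Int) (f+1) board i offset = (board, i) := by
        simp only [pvSowA, hb, if_neg hc]
      rw [step]
      exact ⟨hlen, fun j hj hjh => by simp [pvSowCnt], fun _ => rfl, fun h1 => by omega⟩

def pvAdv (n : Nat) : Nat → Nat → Nat
  | d, 0 => d
  | d, a+1 => pvAdv n (if d = n-1 then 1 else d+1) a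

theorem pv_cnt_nowrap (n h j e : Nat) (hn : 2 ≤ n) (hh : h < n)
    (he1 : 1 ≤ e) (he2 : e ≤ n - 1) (hj : j = (h + e) % n) :
    ∀ rr d, 1 ≤ d → d + rr ≤ n →
      pvSowCnt n h rr d j = if d ≤ e ∧ e < d + rr then 1 else 0 := by
  intro rr
  induction rr with
  | zero =>
    intro d hd1 hd2
    rw [if_neg (by omega)]
    rfl
  | succ rr IH =>
    intro d hd1 hd2
    have hind : (j = (h + d) % n) ↔ e = d := by
      rw [hj]; exact pv_addmod_inj n h e d (by omega) (by omega)
    have hcnt : pvSowCnt n h (rr+1) d j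
        = (if j = (h + d) % n then 1 else 0) + pvSowCnt n h rr (if d = n - 1 then 1 else d + 1) j := rfl
    rw [hcnt]
    by_cases hlast : d = n - 1
    · have hrr : rr = 0 := by omega
      subst hrr
      rw [if_pos hlast]
      have h0 : pvSowCnt n h 0 1 j = 0 := rfl
      rw [h0]
      simp only [hind]
      split_ifs <;> omega
    · rw [if_neg hlast, IH (d+1) (by omega) (by omega)]
      simp only [hind]
      split_ifs <;> omega

theorem pv_adv_lap (n : Nat) (hn : 2 ≤ n) :
    ∀ a d, 1 ≤ a → 1 ≤ d → d + a = n → pvAdv n d a = 1 := by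
  intro a
  induction a with
  | zero => omega
  | succ a IH =>
    intro d ha hd1 hsum
    by_cases ha0 : a = 0
    · subst ha0
      have hd : d = n - 1 := by omega
      show pvAdv n (if d = n-1 then 1 else d+1) 0 = 1
      rw [if_pos hd]
      rfl
    · show pvAdv n (if d = n-1 then 1 else d+1) a = 1
      rw [if_neg (by omega)]
      exact IH (d+1) (by omega) (by omega) (by omega)

theorem pv_cnt_split (n h j : Nat) :
    ∀ a b d, pvSowCnt n h (a + b) d j = pvSowCnt n h a d j + pvSowCnt n h b (pvAdv n d a) j := by
  intro a
  induction a with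
  | zero => intro b d; simp [pvSowCnt, pvAdv]
  | succ a IH =>
    intro b d
    rw [show a + 1 + b = (a + b) + 1 by omega]
    have h1 : pvSowCnt n h ((a+b)+1) d j
        = (if j = (h + d) % n then 1 else 0) + pvSowCnt n h (a+b) (if d = n - 1 then 1 else d + 1) j := rfl
    have h2 : pvSowCnt n h (a+1) d j
        = (if j = (h + d) % n then 1 else 0) + pvSowCnt n h a (if d = n - 1 then 1 else d + 1) j := rfl
    have h3 : pvAdv n d (a+1) = pvAdv n (if d = n-1 then 1 else d+1) a := rfl
    rw [h1, h2, h3, IH]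
    omega

theorem pv_cnt_lap (n h j e : Nat) (hn : 2 ≤ n) (hh : h < n)
    (he1 : 1 ≤ e) (he2 : e ≤ n - 1) (hj : j = (h + e) % n) (b : Nat) :
    pvSowCnt n h (b + (n-1)) 1 j = pvSowCnt n h b 1 j + 1 := by
  rw [show b + (n-1) = (n-1) + b by omega, pv_cnt_split,
    pv_adv_lap n hn (n-1) 1 (by omega) (by omega) (by omega),
    pv_cnt_nowrap n h j e hn hh he1 he2 hj (n-1) 1 (by omega) (by omega),
    if_pos (by omega)]
  omega

theorem pv_cnt_closed (n h j e : Nat) (hn : 2 ≤ n) (hh : h < n)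
    (he1 : 1 ≤ e) (he2 : e ≤ n - 1) (hj : j = (h + e) % n) :
    ∀ r, pvSowCnt n h r 1 j = r / (n-1) + if e ≤ r % (n-1) then 1 else 0 := by
  intro r
  induction r using Nat.strong_induction_on with
  | _ r IH =>
    by_cases hr : r < n - 1
    · rw [pv_cnt_nowrap n h j e hn hh he1 he2 hj r 1 (by omega) (by omega),
        Nat.div_eq_of_lt hr, Nat.mod_eq_of_lt hr]
      split_ifs <;> omega
    · have hrw : r = (r - (n-1)) + (n-1) := by omega
      rw [hrw, pv_cnt_lap n h j e hn hh he1 he2 hj, IH (r - (n-1)) (by omega),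
        Nat.add_div_right _ (by omega), Nat.add_mod_right]
      split_ifs <;> omega

theorem pv_cap_eq (house nI : Int) (hn : 0 < nI) :
    ∀ (fuel : Nat) (b : List Int) (i : Int) (idx : Nat),
      ((idx : Nat) : Int) = (house + i) % nI →
      pvCapA house nI fuel b i = pvCapB nI fuel b idx := by
  intro fuel
  induction fuel with
  | zero => intro b i idx hidx; rfl
  | succ f IH =>
    intro b i idx hidx
    have hmod : PySem.Int.mod (house + i) nI = (house + i) % nI := PySem.Int.mod_eq_emod_of_pos hn
    show (if _ then _ else _) = (if _ then _ else _)
    rw [hmod, ← hidx, Int.toNat_natCast]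
    split_ifs with hcond
    · apply IH
      rw [PySem.Int.mod_eq_emod_of_pos hn,
        Int.toNat_of_nonneg (Int.emod_nonneg _ (by omega))]
      have e1 : (((idx:Nat):Int) - 1) % nI = ((house + i) - 1) % nI := by
        rw [hidx]
        conv_rhs => rw [Int.sub_emod]
        rw [Int.sub_emod ((house+i) % nI) 1 nI, Int.emod_emod_of_dvd _ (dvd_refl nI)]
      rw [e1, show house + i - 1 = house + (i - 1) by ring]
    · rfl

theorem pv_rel_pos (n h j : Nat) (hh : h < n) (hj : j < n) (hjh : j ≠ h) :
    ∃ e : Nat, 1 ≤ e ∧ e ≤ n - 1 ∧ j = (h + e) % n ∧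
      ((j:Int) - (h:Int)) % (n:Int) = ((e:Nat):Int) := by
  refine ⟨if h < j then j - h else j + n - h, by split_ifs <;> omega,
    by split_ifs <;> omega, ?_, ?_⟩
  · by_cases hlt : h < j
    · rw [if_pos hlt, show h + (j - h) = j by omega, Nat.mod_eq_of_lt hj]
    · rw [if_neg hlt, show h + (j + n - h) = j + n by omega, Nat.add_mod_right,
        Nat.mod_eq_of_lt hj]
  · by_cases hlt : h < j
    · rw [if_pos hlt,
        show (j:Int) - (h:Int) = (((j - h : Nat)):Int) by push_cast; omega]
      exact Int.emod_eq_of_lt (by omega) (by push_cast; omega)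
    · rw [if_neg hlt,
        show (j:Int) - (h:Int) = (((j + n - h : Nat)):Int) - (n:Int) by push_cast; omega,
        Int.sub_emod_right]
      exact Int.emod_eq_of_lt (by omega) (by push_cast; omega)

theorem pv_getD_some (xs : List Int) (j : Nat) (hj : j < xs.length) :
    xs[j]? = some (xs.getD j 0) := by
  rw [List.getElem?_eq_getElem hj]
  simp [List.getD_eq_getElem?_getD, List.getElem?_eq_getElem hj]

theorem oware_main (board : List Int) (house : Int)
    (hne : board ≠ []) (hlo : -(board.length : Int) ≤ house) (hhi : house < (board.length : Int))
    (h1 : board.length = 1 → board.getD 0 0 ≤ 0) :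
    oware_move board house = oware_move_alt board house := by
  have hn1 : 1 ≤ board.length := List.length_pos_of_ne_nil hne
  have hhlt : pvHouseIdx house board.length < board.length := by
    simp [pvHouseIdx]; omega
  have hb : PySem.List.pyGet? board house
      = some (board.getD (pvHouseIdx house board.length) 0) :=
    pv_pyGet_house board house hlo hhi
  have hmodh : (PySem.Int.mod house (board.length:Int)).toNat = pvHouseIdx house board.length := by
    rw [PySem.Int.mod_eq_emod_of_pos (by omega),
      pv_emod_house house board.length hlo hhi, Int.toNat_natCast]
  unfold oware_move oware_move_alt
  simp only [hb, hmodh]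
  by_cases hsle : board.getD (pvHouseIdx house board.length) 0 ≤ 0
  · rw [if_pos (Or.inl hsle)]
    have hA1 : pvSowA house (board.length:Int)
        ((2*board.getD (pvHouseIdx house board.length) 0).toNat + 2) board 1 0 = (board, 1) := by
      show pvSowA house (board.length:Int)
        (((2*board.getD (pvHouseIdx house board.length) 0).toNat + 1) + 1) board 1 0 = (board, 1)
      simp only [pvSowA, hb]
      rw [if_neg (by omega)]
    rw [hA1]
    show pvCapA house (board.length:Int) (board.length + 1)
        (board.set (pvHouseIdx house board.length) 0) (1 - 1)
      = board.set (pvHouseIdx house board.length) 0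
    rw [show (1:Int) - 1 = 0 by norm_num]
    have hk : (PySem.Int.mod (house + 0) (board.length:Int)).toNat
        = pvHouseIdx house board.length := by
      rw [add_zero]; exact hmodh
    show (if _ then _ else _) = _
    rw [hk, pv_getD_set board _ _ 0 (by omega), if_pos rfl, if_neg (by norm_num)]
  · have hn2 : 2 ≤ board.length := by
      by_contra hcon
      have hne1 : board.length = 1 := by omega
      have hz : pvHouseIdx house board.length = 0 := by omega
      rw [hz] at hsle
      exact hsle (h1 hne1)
    rw [if_neg (show ¬ (board.getD (pvHouseIdx house board.length) 0 ≤ 0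
        ∨ (board.length:Int) = 1) by push_cast; omega)]
    have h1n : (1:Int) % (board.length:Int) = 1 :=
      Int.emod_eq_of_lt (by omega) (by omega)
    have hfuel : 2 * (board.getD (pvHouseIdx house board.length) 0).toNat
        + (if (1:Int) % (board.length:Int) = 0 then 1 else 0) + 1
        ≤ (2*board.getD (pvHouseIdx house board.length) 0).toNat + 2 := by
      rw [if_neg (by rw [h1n]; omega)]
      omega
    obtain ⟨c1, c2, c3, c4⟩ := pv_sow_spec board.length (pvHouseIdx house board.length) house hn2
      hlo hhi rfl ((2*board.getD (pvHouseIdx house board.length) 0).toNat + 2)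
      (board.getD (pvHouseIdx house board.length) 0).toNat 1 0 board rfl (by omega) (by omega) hfuel
    have hpos1 : pvPos board.length 1 = 1 := by
      unfold pvPos
      rw [h1n]
      norm_num
    rw [hpos1] at c2 c4
    rw [show (1 - 1 + ((board.getD (pvHouseIdx house board.length) 0).toNat - 1))
        = (board.getD (pvHouseIdx house board.length) 0).toNat - 1 by omega] at c4
    set L := board.length with hLd
    set H := pvHouseIdx house board.length with hHd
    set S := board.getD H 0 with hSd
    set P := pvSowA house (L:Int) ((2 * S).toNat + 2) board 1 0 with hPd
    have hL1 : (L:Int) - 1 = (((L - 1 : Nat)):Int) := by push_cast; omega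
    have hq : PySem.Int.floordiv S ((L:Int) - 1) = ((S.toNat / (L-1) : Nat) : Int) := by
      rw [hL1]
      conv_lhs => rw [show S = ((S.toNat : Nat) : Int) by omega]
      rw [PySem.Int.floordiv_natCast]
    have hr : PySem.Int.mod S ((L:Int) - 1) = ((S.toNat % (L-1) : Nat) : Int) := by
      rw [hL1]
      conv_lhs => rw [show S = ((S.toNat : Nat) : Int) by omega]
      rw [PySem.Int.mod_natCast]
    have hidxB : (PySem.Int.mod ((H:Int) + 1 + PySem.Int.mod (S - 1) ((L:Int) - 1)) (L:Int)).toNat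
        = (H + 1 + ((S.toNat - 1) % (L-1))) % L := by
      rw [show S - 1 = (((S.toNat - 1 : Nat)):Int) by omega, hL1,
        PySem.Int.mod_natCast,
        show (H:Int) + 1 + (((S.toNat - 1) % (L - 1) : Nat):Int)
          = (((H + 1 + (S.toNat - 1) % (L - 1) : Nat)):Int) by push_cast; omega,
        PySem.Int.mod_natCast, Int.toNat_natCast]
    have hlenP : (P.1.set H 0).length = L := by rw [List.length_set]; exact c1
    have hout : P.1.set H 0 = List.map
        (fun kv =>
          if kv.1 = ((H:Nat):Int) then 0
          else kv.2 + PySem.Int.floordiv S ((L:Int) - 1) +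
            if PySem.Int.mod (kv.1 - ((H:Nat):Int)) (L:Int) ≤ PySem.Int.mod S ((L:Int) - 1)
            then 1 else 0)
        (PySem.List.enumerate board) := by
      apply List.ext_getElem?
      intro j
      by_cases hj : j < L
      · rw [pv_getD_some _ j (by rw [hlenP]; exact hj),
          List.getElem?_map, PySem.List.getElem?_enumerate,
          pv_getD_some board j (by omega)]
        simp only [Option.map_some]
        congr 1
        rw [pv_getD_set P.1 H j 0 (by rw [c1]; omega)]
        by_cases hjh : j = H
        · rw [if_pos hjh, if_pos (by rw [hjh]; norm_num)]
        · obtain ⟨e, he1, he2, hje, hemod⟩ := pv_rel_pos L H j hhlt hj hjh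
          rw [if_neg hjh,
            if_neg (show ¬ ((0:Int) + (j:Int) = ((H:Nat):Int)) by push_cast; omega),
            c2 j hj hjh,
            pv_cnt_closed L H j e hn2 hhlt he1 he2 hje,
            hq, hr,
            show (0:Int) + (j:Int) - ((H:Nat):Int) = (j:Int) - (H:Int) by ring,
            PySem.Int.mod_eq_emod_of_pos (by omega : (0:Int) < (L:Int)), hemod]
          simp only [Nat.cast_le]
          push_cast
          split_ifs <;> ring
      · rw [List.getElem?_eq_none (by rw [hlenP]; omega),
          List.getElem?_eq_none (by rw [List.length_map, PySem.List.length_enumerate]; omega)]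
    rw [hidxB, ← hout]
    apply pv_cap_eq house (L:Int) (by omega) (L + 1) (P.1.set H 0) (P.2 - 1)
    rw [c4 (by omega)]

-- ===== VERDICT (by name: the statement is the Claim_ definition above) =====
theorem oware_move_spec : Claim_equal_oware_move := by
  intro board house hdom hpre
  obtain ⟨hne, hlo, hhi, h1⟩ := hpre
  unfold Spec_oware_move
  exact oware_main board house hne hlo hhi h1
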